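-- pv_equiv track=rewrite | github.com/brady131313/Louvains | louvains.py | _shiftVertcies
-- ===== SOURCE A (Python) =====
-- def _shiftVertcies(mapping):
--     offsetMapping = {}
--     offset = 0
--
--     for i in range(len(mapping)):
--         if mapping[i] not in offsetMapping:
--             offsetMapping[mapping[i]] = offset
--             offset += 1
--     for i in range(len(mapping)):
--         mapping[i] = offsetMapping[mapping[i]]
--
--     return mapping
-- ===== SOURCE B (Python) =====
-- def _shiftVertcies(mapping):
--     # Dict-free characterization: the new label of a value v is the number of
--     # distinct values occurring strictly before v's first occurrence.
--     orig = list(mapping)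
--     for i in range(len(mapping)):
--         mapping[i] = len(set(orig[:orig.index(orig[i])]))
--     return mapping
-- ===== Notes on version B (the rewrite author's own statement) =====
-- stated objective: alternative
-- what changed: Replaces A's dict of running offsets (build in one pass, rewrite slots in a second) with a dict-free characterization: each slot becomes len(set(orig[:orig.index(v)])), the count of distinct values strictly before v's first occurrence in a saved copy; B trades A's linear time for a simpler quadratic formula with no mutable index map.
import Mathlib
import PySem

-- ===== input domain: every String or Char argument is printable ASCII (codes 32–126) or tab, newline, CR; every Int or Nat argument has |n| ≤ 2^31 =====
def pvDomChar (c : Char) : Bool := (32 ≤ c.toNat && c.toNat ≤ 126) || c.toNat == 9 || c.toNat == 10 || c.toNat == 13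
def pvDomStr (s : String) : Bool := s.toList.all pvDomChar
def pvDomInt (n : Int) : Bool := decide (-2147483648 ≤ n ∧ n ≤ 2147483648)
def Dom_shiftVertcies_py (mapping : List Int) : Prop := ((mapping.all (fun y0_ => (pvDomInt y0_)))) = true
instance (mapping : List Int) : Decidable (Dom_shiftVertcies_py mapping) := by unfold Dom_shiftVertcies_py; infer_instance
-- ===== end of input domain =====

-- B replaces A's dict of running offsets by a dict-free characterization: the new label
-- of a slot is len(set(orig[:orig.index(v)])) — the number of distinct values strictly
-- before v's first occurrence in a saved copy of the list (objective: alternative; B is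
-- quadratic where A is linear). A mutates its argument in place and returns it; the
-- equivalence proved here is about the RETURN value (B performs the same mutation in Python).

-- ===== PORT A =====
-- first loop of A: build offsetMapping, carrying the running offset
def pvBuildA (d : PySem.Dict Int Int) (off : Int) (xs : List Int) : PySem.Dict Int Int :=
  match xs with
  | [] => d
  | x :: rest =>
    if d.contains x then pvBuildA d off rest
    else pvBuildA (d.insert x off) (off + 1) rest

def shiftVertcies_py (mapping : List Int) : List Int :=
  let offsetMapping := pvBuildA PySem.Dict.empty 0 mapping
  -- second loop: mapping[i] = offsetMapping[mapping[i]] (each slot is read once before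
  -- being overwritten, so the values looked up are the original ones; the key is always
  -- present, so the .getD 0 default is never used — it stands for Python's d[k] lookup)
  mapping.map (fun x => ((offsetMapping.get? x).getD 0))

-- ===== PORT B =====
-- len(set(orig[:orig.index(x)])) : orig.index never raises here since x is drawn from
-- orig (the 0 in the none branch is unreachable); orig[:j] with j = index ≥ 0 is take j
def pvRankB (orig : List Int) (x : Int) : Int :=
  match PySem.List.index? orig x with
  | some j => PySem.Set.len (PySem.Set.ofList (orig.take j))
  | none => 0

def shiftVertcies_py_alt (mapping : List Int) : List Int :=
  -- orig = list(mapping); then each slot i is overwritten with pvRankB orig mapping[i]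
  mapping.map (fun x => pvRankB mapping x)

-- ===== PRECONDITION & SPEC =====
def Spec_shiftVertcies_py (mapping : List Int) (out : List Int) : Prop := out = shiftVertcies_py_alt mapping
instance (mapping : List Int) (out : List Int) : Decidable (Spec_shiftVertcies_py mapping out) := by unfold Spec_shiftVertcies_py; infer_instance

-- ===== CLAIM (what is proved, stated in full; the proofs are below) =====
def Claim_equal_shiftVertcies_py : Prop := ∀ (mapping : List Int), Dom_shiftVertcies_py mapping → Spec_shiftVertcies_py mapping (shiftVertcies_py mapping)

-- ===== LEMMAS AND PROOFS =====

-- A's first loop, started from a dict that indexes the set S, produces the dict that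
-- indexes S updated with xs
theorem pvBuildA_get? (xs : List Int) (S : PySem.Set Int) (d : PySem.Dict Int Int)
    (hd : ∀ y, d.get? y = (PySem.List.index? S y).map Int.ofNat) (y : Int) :
    (pvBuildA d (S.length : Int) xs).get? y
      = (PySem.List.index? (PySem.Set.update S xs) y).map Int.ofNat := by
  induction xs generalizing S d with
  | nil => simp [pvBuildA, PySem.Set.update_nil, hd]
  | cons x rest ih =>
    have hcont : d.contains x = (PySem.List.index? S x).isSome := by
      rw [PySem.Dict.contains_eq_isSome_get?, hd]; cases PySem.List.index? S x <;> rfl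
    by_cases hx : x ∈ S
    · have hc : d.contains x = true := by
        rw [hcont, (PySem.List.index?_isSome_iff S x).mpr hx]
      have hadd : S.add x = S := PySem.Set.add_of_mem hx
      simp only [pvBuildA, hc, if_true, PySem.Set.update_cons, hadd]
      exact ih S d hd
    · have hc : d.contains x = false := by
        rw [hcont]
        cases h : PySem.List.index? S x with
        | none => rfl
        | some k =>
          exact absurd ((PySem.List.index?_isSome_iff S x).mp (by rw [h]; rfl)) hx
      have hadd : S.add x = S ++ [x] := PySem.Set.add_of_not_mem hx
      have hd' : ∀ y, (d.insert x (S.length : Int)).get? y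
          = (PySem.List.index? (S ++ [x]) y).map Int.ofNat := by
        intro y
        by_cases hy : y = x
        · subst hy
          rw [PySem.Dict.get?_insert_self, PySem.List.index?_append_singleton_self S _ hx]
          rfl
        · rw [PySem.Dict.get?_insert_of_ne d _ hy, hd y]
          by_cases hyS : y ∈ S
          · rw [PySem.List.index?_append_of_mem (l := S) [x] hyS]
          · have h1 : PySem.List.index? S y = none :=
              (PySem.List.index?_eq_none_iff S y).mpr hyS
            have h2 : PySem.List.index? (S ++ [x]) y = none := by
              rw [PySem.List.index?_eq_none_iff]
              simp [hyS, hy]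
            rw [h1, h2]
      have hlen : (S.length : Int) + 1 = ((S ++ [x]).length : Int) := by
        simp
      simp only [pvBuildA, hc, if_false, PySem.Set.update_cons, hadd, Bool.false_eq_true]
      rw [hlen]
      exact ih (S ++ [x]) _ hd'

-- rank of x in the dedup of orig = number of distinct values before x's first occurrence
theorem index?_ofList_of_index? (orig : List Int) (x : Int) (j : Nat)
    (hj : PySem.List.index? orig x = some j) :
    PySem.List.index? (PySem.Set.ofList orig) x
      = some (PySem.Set.ofList (orig.take j)).length := by
  obtain ⟨pre, suf, horig, hlen, hpre⟩ := (PySem.List.index?_eq_some_iff orig x j).mp hj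
  have htake : orig.take j = pre := by
    rw [horig, ← hlen, List.take_left]
  have hxpre : x ∉ PySem.Set.ofList pre := by
    rw [PySem.Set.mem_ofList]; exact hpre
  have hsplit : PySem.Set.ofList orig
      = PySem.Set.update (PySem.Set.ofList pre ++ [x]) suf := by
    rw [horig]
    show PySem.Set.ofList (pre ++ x :: suf) = _
    rw [PySem.Set.ofList_append, PySem.Set.update_cons, PySem.Set.add_of_not_mem hxpre]
  rw [hsplit, htake, PySem.Set.update_eq_append_filter,
    PySem.List.index?_append_of_mem _ (by simp : x ∈ PySem.Set.ofList pre ++ [x]),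
    PySem.List.index?_append_singleton_self _ x hxpre]

-- ===== VERDICT (by name: the statement is the Claim_ definition above) =====
theorem shiftVertcies_py_spec : Claim_equal_shiftVertcies_py := by
  intro mapping _
  unfold Spec_shiftVertcies_py shiftVertcies_py shiftVertcies_py_alt
  apply List.map_congr_left
  intro x hx
  have hget : (pvBuildA PySem.Dict.empty 0 mapping).get? x
      = (PySem.List.index? (PySem.Set.ofList mapping) x).map Int.ofNat := by
    have := pvBuildA_get? mapping [] PySem.Dict.empty
      (by intro y; simp [PySem.Dict.get?_empty, PySem.List.index?]) x
    simpa [PySem.Set.update_empty] using this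
  obtain ⟨j, hj⟩ : ∃ j, PySem.List.index? mapping x = some j := by
    cases h : PySem.List.index? mapping x with
    | none => exact absurd hx ((PySem.List.index?_eq_none_iff mapping x).mp h)
    | some j => exact ⟨j, rfl⟩
  have hj' : List.idxOf? x mapping = some j := by
    rw [← PySem.List.index?_eq_idxOf?]; exact hj
  rw [hget, index?_ofList_of_index? mapping x j hj]
  simp [pvRankB, hj', PySem.Set.len]
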